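-- pv_equiv track=rewrite | github.com/michi-sxc/GRAFT | pages/simulation.py | calculate_md_and_nm_tags
-- ===== SOURCE A (Python) =====
-- def calculate_md_and_nm_tags(query_seq, ref_seq):
--     """
--     Calculate the MD tag string and NM tag value by comparing the query sequence to the reference sequence.
--     """
--     md_string = ""
--     match_count = 0
--     nm_count = 0  # Number of mismatches
--     for q_base, r_base in zip(query_seq, ref_seq):
--         if q_base == r_base:
--             match_count += 1
--         else:
--             nm_count += 1
--             if match_count > 0:
--                 md_string += str(match_count)
--                 match_count = 0
--             md_string += r_base
--     if match_count > 0: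
--         md_string += str(match_count)
--     return md_string, nm_count
-- ===== SOURCE B (Python) =====
-- def calculate_md_and_nm_tags(query_seq, ref_seq):
--     """
--     Calculate the MD tag string and NM tag value by comparing the query sequence to the reference sequence.
--     Run-decomposition version: split the aligned pairs into maximal runs of
--     matches/mismatches, emit one part per run, and join at the end.
--     """
--     pairs = list(zip(query_seq, ref_seq))
--     n = len(pairs)
--     parts = []
--     nm_count = 0
--     i = 0
--     while i < n:
--         key = pairs[i][0] == pairs[i][1]
--         j = i
--         while j < n and (pairs[j][0] == pairs[j][1]) == key:
--             j += 1
--         if key: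
--             parts.append(str(j - i))
--         else:
--             nm_count += j - i
--             parts.append("".join(r for _, r in pairs[i:j]))
--         i = j
--     return "".join(parts), nm_count
-- ===== Notes on version B (the rewrite author's own statement) =====
-- stated objective: alternative
-- what changed: Replaces A's per-character accumulator loop (running match_count flushed at each mismatch) with a run-decomposition: split the zipped pairs into maximal match/mismatch runs, emit one MD part per run, and join the parts once at the end.
import Mathlib
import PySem

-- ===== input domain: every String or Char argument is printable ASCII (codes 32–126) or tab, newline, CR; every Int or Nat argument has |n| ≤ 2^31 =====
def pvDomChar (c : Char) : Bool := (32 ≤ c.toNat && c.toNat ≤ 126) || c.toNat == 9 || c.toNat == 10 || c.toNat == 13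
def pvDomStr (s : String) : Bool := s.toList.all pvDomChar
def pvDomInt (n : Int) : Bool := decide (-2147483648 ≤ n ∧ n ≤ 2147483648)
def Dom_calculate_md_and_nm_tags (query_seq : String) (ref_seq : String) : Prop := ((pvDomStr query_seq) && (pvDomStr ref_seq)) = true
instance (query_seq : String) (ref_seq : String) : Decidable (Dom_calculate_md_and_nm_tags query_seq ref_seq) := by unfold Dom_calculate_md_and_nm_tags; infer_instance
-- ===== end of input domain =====

-- B replaces A's running match_count accumulator with a run-decomposition (maximal match/mismatch runs, one MD part per run, joined at the end); same O(n) cost, proved to return identical (MD string, NM count).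


-- ===== PORT A =====
-- literal port of A: single fold over zip with running match_count, flushed at each mismatch and at the end
def pvAStep (st : List Char × Int × Int) (p : Char × Char) : List Char × Int × Int :=
  if p.1 == p.2 then (st.1, st.2.1 + 1, st.2.2)
  else
    let md := if st.2.1 > 0 then st.1 ++ (PySem.Int.toStr st.2.1).toList else st.1
    (md ++ [p.2], 0, st.2.2 + 1)

def calculate_md_and_nm_tags (query_seq : String) (ref_seq : String) : String × Int :=
  let r := (List.zip query_seq.toList ref_seq.toList).foldl pvAStep ([], 0, 0)
  (String.ofList (if r.2.1 > 0 then r.1 ++ (PySem.Int.toStr r.2.1).toList else r.1), r.2.2)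

-- ===== PORT B =====
-- literal port of B: run decomposition (span into maximal match/mismatch runs, one part per run, join at the end)
def pvBGo : List (Char × Char) → List (List Char) × Int
  | [] => ([], 0)
  | p :: rest =>
    let key := p.1 == p.2
    let run := List.takeWhile (fun q => (q.1 == q.2) == key) (p :: rest)
    let tail := List.dropWhile (fun q => (q.1 == q.2) == key) (p :: rest)
    let r := pvBGo tail
    if key then ((PySem.Int.toStr (run.length : Int)).toList :: r.1, r.2)
    else (List.map Prod.snd run :: r.1, r.2 + run.length)
termination_by l => l.length
decreasing_by
  simp only [List.dropWhile_cons, beq_self_eq_true, if_pos]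
  exact Nat.lt_succ_of_le (List.length_dropWhile_le _ _)

def calculate_md_and_nm_tags_alt (query_seq : String) (ref_seq : String) : String × Int :=
  let r := pvBGo (List.zip query_seq.toList ref_seq.toList)
  (String.ofList r.1.flatten, r.2)

-- ===== PRECONDITION & SPEC =====
def Spec_calculate_md_and_nm_tags (query_seq : String) (ref_seq : String) (out : String × Int) : Prop := out = calculate_md_and_nm_tags_alt query_seq ref_seq
instance (query_seq : String) (ref_seq : String) (out : String × Int) : Decidable (Spec_calculate_md_and_nm_tags query_seq ref_seq out) := by unfold Spec_calculate_md_and_nm_tags; infer_instance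

-- ===== CLAIM (what is proved, stated in full; the proofs are below) =====
def Claim_equal_calculate_md_and_nm_tags : Prop := ∀ (query_seq : String) (ref_seq : String), Dom_calculate_md_and_nm_tags query_seq ref_seq → Spec_calculate_md_and_nm_tags query_seq ref_seq (calculate_md_and_nm_tags query_seq ref_seq)

-- ===== LEMMAS AND PROOFS =====

-- finalize A's fold state: flush a positive match_count
def pvFin (st : List Char × Int × Int) : List Char × Int :=
  (if st.2.1 > 0 then st.1 ++ (PySem.Int.toStr st.2.1).toList else st.1, st.2.2)

lemma pvDropHead {α : Type} (pr : α → Bool) : ∀ (l : List α) (a : α) (as : List α),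
    List.dropWhile pr l = a :: as → pr a = false := by
  intro l
  induction l with
  | nil => intro a as h; simp at h
  | cons b bs ih =>
    intro a as h
    rw [List.dropWhile_cons] at h
    by_cases hb : pr b = true
    · rw [if_pos hb] at h; exact ih a as h
    · rw [if_neg hb] at h
      cases h
      simpa using hb

lemma pvMatchRun (run : List (Char × Char)) (h : ∀ q ∈ run, (q.1 == q.2) = true)
    (md : List Char) (mc nm : Int) :
    run.foldl pvAStep (md, mc, nm) = (md, mc + run.length, nm) := by
  induction run generalizing mc with
  | nil => simp
  | cons a l ih =>
    have ha := h a (by simp)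
    rw [List.foldl_cons]
    simp only [pvAStep, ha, if_true]
    rw [ih (fun q hq => h q (List.mem_cons_of_mem _ hq))]
    simp only [List.length_cons, Prod.mk.injEq, true_and]
    refine ⟨by push_cast; ring, trivial⟩

lemma pvMismatchRun (run : List (Char × Char)) (h : ∀ q ∈ run, (q.1 == q.2) = false)
    (md : List Char) (nm : Int) :
    run.foldl pvAStep (md, 0, nm) = (md ++ List.map Prod.snd run, 0, nm + run.length) := by
  induction run generalizing md nm with
  | nil => simp
  | cons a l ih =>
    have ha := h a (by simp)
    rw [List.foldl_cons]
    simp only [pvAStep, ha, Bool.false_eq_true, if_false, gt_iff_lt, lt_self_iff_false]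
    rw [ih (fun q hq => h q (List.mem_cons_of_mem _ hq))]
    simp only [List.map_cons, List.length_cons, List.append_assoc, List.singleton_append,
      Prod.mk.injEq, true_and]
    push_cast; ring

lemma pvBGo_cons (x : Char × Char) (rest : List (Char × Char)) :
    pvBGo (x :: rest) =
      (if x.1 == x.2 then
        ((PySem.Int.toStr ((List.takeWhile (fun q => (q.1 == q.2) == (x.1 == x.2)) (x :: rest)).length : Int)).toList
          :: (pvBGo (List.dropWhile (fun q => (q.1 == q.2) == (x.1 == x.2)) (x :: rest))).1,
         (pvBGo (List.dropWhile (fun q => (q.1 == q.2) == (x.1 == x.2)) (x :: rest))).2)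
      else
        (List.map Prod.snd (List.takeWhile (fun q => (q.1 == q.2) == (x.1 == x.2)) (x :: rest))
          :: (pvBGo (List.dropWhile (fun q => (q.1 == q.2) == (x.1 == x.2)) (x :: rest))).1,
         (pvBGo (List.dropWhile (fun q => (q.1 == q.2) == (x.1 == x.2)) (x :: rest))).2
           + (List.takeWhile (fun q => (q.1 == q.2) == (x.1 == x.2)) (x :: rest)).length)) := by
  rw [pvBGo]

-- a maximal match run followed by tail: A flushes the count exactly where B emits its part
lemma pvKeyTrue (run tail : List (Char × Char)) (md : List Char) (nm : Int)
    (hmem : ∀ q ∈ run, (q.1 == q.2) = true) (hpos : 0 < run.length)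
    (hhead : ∀ t ts, tail = t :: ts → (t.1 == t.2) = false)
    (IH : ∀ (md : List Char) (nm : Int),
      pvFin (tail.foldl pvAStep (md, 0, nm)) = (md ++ (pvBGo tail).1.flatten, nm + (pvBGo tail).2)) :
    pvFin ((run ++ tail).foldl pvAStep (md, 0, nm)) =
      (md ++ ((PySem.Int.toStr (run.length : Int)).toList :: (pvBGo tail).1).flatten,
       nm + (pvBGo tail).2) := by
  have hposI : (0 : Int) < (run.length : Int) := by exact_mod_cast hpos
  rw [List.foldl_append, pvMatchRun run hmem md 0 nm, zero_add]
  cases tail with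
  | nil =>
    simp only [List.foldl_nil, pvFin, gt_iff_lt, hposI, if_pos, pvBGo, List.flatten_cons,
      List.flatten_nil, List.append_nil, add_zero]
  | cons t ts =>
    have htm := hhead t ts rfl
    rw [List.foldl_cons]
    have hstep : pvAStep (md, (run.length : Int), nm) t
        = pvAStep (md ++ (PySem.Int.toStr (run.length : Int)).toList, 0, nm) t := by
      simp only [pvAStep, htm, Bool.false_eq_true, if_false, gt_iff_lt, lt_self_iff_false,
        hposI, if_pos]
    rw [hstep, ← List.foldl_cons, IH]
    simp [List.append_assoc]

-- a maximal mismatch run followed by tail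
lemma pvKeyFalse (run tail : List (Char × Char)) (md : List Char) (nm : Int)
    (hmem : ∀ q ∈ run, (q.1 == q.2) = false)
    (IH : ∀ (md : List Char) (nm : Int),
      pvFin (tail.foldl pvAStep (md, 0, nm)) = (md ++ (pvBGo tail).1.flatten, nm + (pvBGo tail).2)) :
    pvFin ((run ++ tail).foldl pvAStep (md, 0, nm)) =
      (md ++ (List.map Prod.snd run :: (pvBGo tail).1).flatten,
       nm + ((pvBGo tail).2 + run.length)) := by
  rw [List.foldl_append, pvMismatchRun run hmem md nm, IH]
  simp only [List.flatten_cons, List.append_assoc, Prod.mk.injEq, true_and]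
  ring

lemma pvMain (n : Nat) : ∀ (l : List (Char × Char)), l.length ≤ n → ∀ (md : List Char) (nm : Int),
    pvFin (l.foldl pvAStep (md, 0, nm)) = (md ++ (pvBGo l).1.flatten, nm + (pvBGo l).2) := by
  induction n with
  | zero =>
    intro l hl md nm
    rw [List.length_eq_zero_iff.mp (Nat.le_zero.mp hl)]
    simp [pvBGo, pvFin]
  | succ n ih =>
    intro l hl md nm
    cases l with
    | nil => simp [pvBGo, pvFin]
    | cons x rest =>
      have hpred : (fun q : Char × Char => (q.1 == q.2) == (x.1 == x.2)) x = true := by simp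
      have htl : (List.dropWhile (fun q : Char × Char => (q.1 == q.2) == (x.1 == x.2)) (x :: rest)).length ≤ n := by
        rw [List.dropWhile_cons, if_pos hpred]
        have := List.length_dropWhile_le (fun q : Char × Char => (q.1 == q.2) == (x.1 == x.2)) rest
        simp only [List.length_cons, Nat.succ_le_succ_iff] at hl
        omega
      have hmem : ∀ q ∈ List.takeWhile (fun q : Char × Char => (q.1 == q.2) == (x.1 == x.2)) (x :: rest),
          (q.1 == q.2) = (x.1 == x.2) := fun q hq => eq_of_beq (List.mem_takeWhile_imp (p := fun c : Char × Char => (c.1 == c.2) == (x.1 == x.2)) hq)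
      have hpos : 0 < (List.takeWhile (fun q : Char × Char => (q.1 == q.2) == (x.1 == x.2)) (x :: rest)).length := by
        rw [List.takeWhile_cons, if_pos hpred]; simp
      have IH : ∀ (md : List Char) (nm : Int),
          pvFin ((List.dropWhile (fun q : Char × Char => (q.1 == q.2) == (x.1 == x.2)) (x :: rest)).foldl pvAStep (md, 0, nm))
            = (md ++ (pvBGo (List.dropWhile (fun q : Char × Char => (q.1 == q.2) == (x.1 == x.2)) (x :: rest))).1.flatten,
               nm + (pvBGo (List.dropWhile (fun q : Char × Char => (q.1 == q.2) == (x.1 == x.2)) (x :: rest))).2) :=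
        fun md nm => ih _ htl md nm
      conv_lhs => rw [← List.takeWhile_append_dropWhile
        (p := fun q : Char × Char => (q.1 == q.2) == (x.1 == x.2)) (l := x :: rest)]
      rw [pvBGo_cons]
      by_cases hk : (x.1 == x.2) = true
      · rw [if_pos hk]
        have hmem' : ∀ q ∈ List.takeWhile (fun q : Char × Char => (q.1 == q.2) == (x.1 == x.2)) (x :: rest),
            (q.1 == q.2) = true := fun q hq => by rw [hmem q hq, hk]
        have hhead : ∀ t ts,
            List.dropWhile (fun q : Char × Char => (q.1 == q.2) == (x.1 == x.2)) (x :: rest) = t :: ts →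
            (t.1 == t.2) = false := by
          intro t ts h
          have h1 := pvDropHead _ _ _ _ h
          simp only [hk, beq_true] at h1
          exact h1
        exact pvKeyTrue _ _ md nm hmem' hpos hhead IH
      · rw [if_neg hk]
        have hmem' : ∀ q ∈ List.takeWhile (fun q : Char × Char => (q.1 == q.2) == (x.1 == x.2)) (x :: rest),
            (q.1 == q.2) = false := fun q hq => by
          rw [hmem q hq]; simpa using hk
        exact pvKeyFalse _ _ md nm hmem' IH

-- ===== VERDICT (by name: the statement is the Claim_ definition above) =====
theorem calculate_md_and_nm_tags_spec : Claim_equal_calculate_md_and_nm_tags := by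
  intro q r _
  unfold Spec_calculate_md_and_nm_tags calculate_md_and_nm_tags calculate_md_and_nm_tags_alt
  have h := pvMain (List.zip q.toList r.toList).length (List.zip q.toList r.toList) le_rfl [] 0
  simp only [pvFin, List.nil_append, zero_add] at h
  exact congrArg (fun p : List Char × Int => (String.ofList p.1, p.2)) h
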